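-- pv_equiv track=rewrite | github.com/Xx-D3V-xX/Meta-Hack-VyomRaksha | server/orchestrator/conflict_resolver.py | _are_exclusive
-- ===== SOURCE A (Python) =====
-- def _are_exclusive(action_a: str, action_b: str) -> bool:
--     """
--     Two actions are mutually exclusive if they conflict on a shared physical system.
--     Grouped by the system they operate on.
--     """
--     _EXCLUSIVE_GROUPS: list[set[str]] = [
--         {"enter_safe_mode", "emergency_safe_mode", "run_instrument_r2",
--          "reduce_instrument_load", "emergency_shutdown"},
--         {"radiation_shield_activate", "radiation_shield_deactivate"},
--         {"transmit_data_r2", "boost_comms", "emergency_beacon", "delay_transmission"},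
--         {"recharge", "emergency_shutdown"},
--         {"maneuver_r2", "emergency_response", "fuel_conservation_mode"},
--         {"thermal_vent", "reduce_instrument_load"},
--     ]
--     for group in _EXCLUSIVE_GROUPS:
--         if action_a in group and action_b in group:
--             return True
--     return False
-- ===== SOURCE B (Python) =====
-- # Inverted representation: each action is tagged with the physical systems it
-- # occupies; two actions are exclusive iff they share a system tag.
-- _SYSTEM_INDEX: dict[str, frozenset[str]] = {
--     "enter_safe_mode": frozenset({"safe_mode"}),
--     "emergency_safe_mode": frozenset({"safe_mode"}),
--     "run_instrument_r2": frozenset({"safe_mode"}),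
--     "reduce_instrument_load": frozenset({"safe_mode", "thermal"}),
--     "emergency_shutdown": frozenset({"safe_mode", "power"}),
--     "radiation_shield_activate": frozenset({"shield"}),
--     "radiation_shield_deactivate": frozenset({"shield"}),
--     "transmit_data_r2": frozenset({"comms"}),
--     "boost_comms": frozenset({"comms"}),
--     "emergency_beacon": frozenset({"comms"}),
--     "delay_transmission": frozenset({"comms"}),
--     "recharge": frozenset({"power"}),
--     "maneuver_r2": frozenset({"nav"}),
--     "emergency_response": frozenset({"nav"}),
--     "fuel_conservation_mode": frozenset({"nav"}),
--     "thermal_vent": frozenset({"thermal"}),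
-- }
--
-- _EMPTY: frozenset[str] = frozenset()
--
--
-- def _are_exclusive(action_a: str, action_b: str) -> bool:
--     """
--     Two actions are mutually exclusive if they conflict on a shared physical system.
--     Each action carries its set of system tags; exclusivity = shared tag.
--     """
--     return not _SYSTEM_INDEX.get(action_a, _EMPTY).isdisjoint(
--         _SYSTEM_INDEX.get(action_b, _EMPTY))
-- ===== Notes on version B (the rewrite author's own statement) =====
-- stated objective: idiomatic
-- what changed: Inverts the data representation: instead of scanning six group sets testing both actions' membership in each, B keeps a literal action->set-of-system-tags dict (emergency_shutdown and reduce_instrument_load carry two tags) and answers with two lookups and one set-disjointness test, no loop over groups.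
import Mathlib
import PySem

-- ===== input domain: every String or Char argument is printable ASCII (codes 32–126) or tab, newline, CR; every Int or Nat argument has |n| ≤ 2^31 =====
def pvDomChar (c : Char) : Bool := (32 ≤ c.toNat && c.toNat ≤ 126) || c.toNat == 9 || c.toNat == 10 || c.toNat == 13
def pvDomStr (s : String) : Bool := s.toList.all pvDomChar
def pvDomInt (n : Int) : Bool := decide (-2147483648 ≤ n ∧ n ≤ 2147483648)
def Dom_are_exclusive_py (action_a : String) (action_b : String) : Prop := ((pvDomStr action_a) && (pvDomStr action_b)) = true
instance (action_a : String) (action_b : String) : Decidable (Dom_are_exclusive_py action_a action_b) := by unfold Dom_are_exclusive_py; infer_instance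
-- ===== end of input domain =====

-- B inverts the representation: a literal action -> set-of-system-tags dict
-- replaces A's scan over six group sets; the answer is two lookups and one
-- set-disjointness test (idiomatic, loop-free per call).

-- ===== PORT A =====
-- A's literal group list: list of Python sets (each literal has distinct elements).
def pvGroupsA : List (PySem.Set String) :=
  [ ["enter_safe_mode", "emergency_safe_mode", "run_instrument_r2",
     "reduce_instrument_load", "emergency_shutdown"],
    ["radiation_shield_activate", "radiation_shield_deactivate"],
    ["transmit_data_r2", "boost_comms", "emergency_beacon", "delay_transmission"],
    ["recharge", "emergency_shutdown"],
    ["maneuver_r2", "emergency_response", "fuel_conservation_mode"],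
    ["thermal_vent", "reduce_instrument_load"] ]

-- the 'for group in _EXCLUSIVE_GROUPS: if … return True' loop with early return
def pvLoopA (a b : String) : List (PySem.Set String) → Bool
  | [] => false
  | g :: rest =>
      if PySem.Set.contains g a && PySem.Set.contains g b then true
      else pvLoopA a b rest

def are_exclusive_py (action_a : String) (action_b : String) : Bool :=
  pvLoopA action_a action_b pvGroupsA

-- ===== PORT B =====
-- B's literal _SYSTEM_INDEX dict: action -> frozenset of system tags
def pvSysIndex : PySem.Dict String (PySem.Set String) := PySem.Dict.mk
  [ ("enter_safe_mode", ["safe_mode"]),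
    ("emergency_safe_mode", ["safe_mode"]),
    ("run_instrument_r2", ["safe_mode"]),
    ("reduce_instrument_load", ["safe_mode", "thermal"]),
    ("emergency_shutdown", ["safe_mode", "power"]),
    ("radiation_shield_activate", ["shield"]),
    ("radiation_shield_deactivate", ["shield"]),
    ("transmit_data_r2", ["comms"]),
    ("boost_comms", ["comms"]),
    ("emergency_beacon", ["comms"]),
    ("delay_transmission", ["comms"]),
    ("recharge", ["power"]),
    ("maneuver_r2", ["nav"]),
    ("emergency_response", ["nav"]),
    ("fuel_conservation_mode", ["nav"]),
    ("thermal_vent", ["thermal"]) ]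

def are_exclusive_py_alt (action_a : String) (action_b : String) : Bool :=
  ! PySem.Set.isdisjoint (pvSysIndex.getD action_a PySem.Set.empty)
      (pvSysIndex.getD action_b PySem.Set.empty)

-- ===== PRECONDITION & SPEC =====
def Spec_are_exclusive_py (action_a : String) (action_b : String) (out : Bool) : Prop := out = are_exclusive_py_alt action_a action_b
instance (action_a : String) (action_b : String) (out : Bool) : Decidable (Spec_are_exclusive_py action_a action_b out) := by unfold Spec_are_exclusive_py; infer_instance

-- ===== CLAIM (what is proved, stated in full; the proofs are below) =====
def Claim_equal_are_exclusive_py : Prop := ∀ (action_a : String) (action_b : String), Dom_are_exclusive_py action_a action_b → Spec_are_exclusive_py action_a action_b (are_exclusive_py action_a action_b)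

-- ===== LEMMAS AND PROOFS =====

-- every action name occurring in any group / in the index
def pvNames : List String :=
  ["enter_safe_mode", "emergency_safe_mode", "run_instrument_r2",
   "reduce_instrument_load", "emergency_shutdown",
   "radiation_shield_activate", "radiation_shield_deactivate",
   "transmit_data_r2", "boost_comms", "emergency_beacon", "delay_transmission",
   "recharge", "maneuver_r2", "emergency_response", "fuel_conservation_mode",
   "thermal_vent"]

theorem pvA_notin_left {a b : String} (h : a ∉ pvNames) :
    are_exclusive_py a b = false := by
  simp [pvNames] at h
  obtain ⟨h1, h2, h3, h4, h5, h6, h7, h8, h9, h10, h11, h12, h13, h14, h15, h16⟩ := h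
  simp [are_exclusive_py, pvGroupsA, pvLoopA, PySem.Set.contains,
    h1, h2, h3, h4, h5, h6, h7, h8, h9, h10, h11, h12, h13, h14, h15, h16]

theorem pvA_notin_right {a b : String} (h : b ∉ pvNames) :
    are_exclusive_py a b = false := by
  simp [pvNames] at h
  obtain ⟨h1, h2, h3, h4, h5, h6, h7, h8, h9, h10, h11, h12, h13, h14, h15, h16⟩ := h
  simp [are_exclusive_py, pvGroupsA, pvLoopA, PySem.Set.contains,
    h1, h2, h3, h4, h5, h6, h7, h8, h9, h10, h11, h12, h13, h14, h15, h16]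

theorem pvAlt_notin_left {a b : String} (h : a ∉ pvNames) :
    are_exclusive_py_alt a b = false := by
  simp [pvNames] at h
  obtain ⟨h1, h2, h3, h4, h5, h6, h7, h8, h9, h10, h11, h12, h13, h14, h15, h16⟩ := h
  simp [are_exclusive_py_alt, pvSysIndex, PySem.Dict.getD_eq_get?_getD,
    PySem.Dict.get?, PySem.Set.isdisjoint, Ne.symm h1, Ne.symm h2, Ne.symm h3,
    Ne.symm h4, Ne.symm h5, Ne.symm h6, Ne.symm h7, Ne.symm h8, Ne.symm h9,
    Ne.symm h10, Ne.symm h11, Ne.symm h12, Ne.symm h13, Ne.symm h14,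
    Ne.symm h15, Ne.symm h16]

theorem pvAlt_notin_right {a b : String} (h : b ∉ pvNames) :
    are_exclusive_py_alt a b = false := by
  simp [pvNames] at h
  obtain ⟨h1, h2, h3, h4, h5, h6, h7, h8, h9, h10, h11, h12, h13, h14, h15, h16⟩ := h
  simp [are_exclusive_py_alt, pvSysIndex, PySem.Dict.getD_eq_get?_getD,
    PySem.Dict.get?, PySem.Set.isdisjoint, Ne.symm h1, Ne.symm h2, Ne.symm h3,
    Ne.symm h4, Ne.symm h5, Ne.symm h6, Ne.symm h7, Ne.symm h8, Ne.symm h9,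
    Ne.symm h10, Ne.symm h11, Ne.symm h12, Ne.symm h13, Ne.symm h14,
    Ne.symm h15, Ne.symm h16]

-- ===== VERDICT (by name: the statement is the Claim_ definition above) =====
theorem are_exclusive_py_spec : Claim_equal_are_exclusive_py := by
  intro a b _
  unfold Spec_are_exclusive_py
  by_cases ha : a ∈ pvNames
  · by_cases hb : b ∈ pvNames
    · fin_cases ha <;> fin_cases hb <;> decide
    · rw [pvA_notin_right hb, pvAlt_notin_right hb]
  · rw [pvA_notin_left ha, pvAlt_notin_left ha]
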